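-- pv_equiv track=rewrite | github.com/lipingtababa/liangxiao | agents/tester/models.py | _analyze_common_issues
-- ===== SOURCE A (Python) =====
-- from typing import List, Optional, Dict, Any, Literal, Set
--
-- def _analyze_common_issues(failed_tests: List[Dict[str, Any]]) -> List[str]:
--     """Analyze common patterns in test failures."""
--     # This is a simplified implementation - could be much more sophisticated
--     issues = []
--     error_messages = [test.get('error', '') for test in failed_tests]
--
--     # Check for common error patterns
--     if any('AssertionError' in msg for msg in error_messages):
--         issues.append("Assertion failures - check test expectations")
--
--     if any('ImportError' in msg for msg in error_messages):
--         issues.append("Import errors - check dependencies")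
--
--     if any('timeout' in msg.lower() for msg in error_messages):
--         issues.append("Timeout issues - tests running too long")
--
--     return issues
-- ===== SOURCE B (Python) =====
-- def _analyze_common_issues(failed_tests):
--     """Analyze common patterns in test failures (single pass over the tests)."""
--     saw_assert = False
--     saw_import = False
--     saw_timeout = False
--     for test in failed_tests:
--         err = test.get('error', '')
--         saw_assert = saw_assert or ('AssertionError' in err)
--         saw_import = saw_import or ('ImportError' in err)
--         saw_timeout = saw_timeout or ('timeout' in err.lower())
--     issues = []
--     if saw_assert:
--         issues.append("Assertion failures - check test expectations")
--     if saw_import: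
--         issues.append("Import errors - check dependencies")
--     if saw_timeout:
--         issues.append("Timeout issues - tests running too long")
--     return issues
-- ===== Notes on version B (the rewrite author's own statement) =====
-- stated objective: alternative
-- what changed: Replaced the intermediate error_messages list and three separate any()-scans by one state-maintaining pass over failed_tests that accumulates three booleans, then emits the fixed messages from the flags.
import Mathlib
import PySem

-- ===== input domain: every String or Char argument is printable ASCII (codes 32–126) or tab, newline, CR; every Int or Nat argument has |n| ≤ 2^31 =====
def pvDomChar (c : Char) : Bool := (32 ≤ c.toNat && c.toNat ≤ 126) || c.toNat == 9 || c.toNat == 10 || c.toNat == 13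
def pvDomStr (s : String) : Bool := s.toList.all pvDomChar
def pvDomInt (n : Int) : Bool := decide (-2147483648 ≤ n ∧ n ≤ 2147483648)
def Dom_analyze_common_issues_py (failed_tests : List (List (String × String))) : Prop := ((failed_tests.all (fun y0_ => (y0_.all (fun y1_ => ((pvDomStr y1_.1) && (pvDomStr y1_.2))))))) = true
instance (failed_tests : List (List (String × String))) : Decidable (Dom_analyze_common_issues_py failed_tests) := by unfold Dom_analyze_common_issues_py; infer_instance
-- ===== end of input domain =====

-- B replaces A's intermediate error_messages list and three any()-scans with one pass over
-- failed_tests maintaining three boolean flags (alternative decomposition, same cost).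


-- ===== PORT A =====
def analyze_common_issues_py (failed_tests : List (List (String × String))) : List String :=
  let error_messages := failed_tests.map (fun test => PySem.Dict.getD ⟨test⟩ "error" "")
  let issues : List String := []
  let issues := if error_messages.any (fun msg => PySem.Str.isIn "AssertionError" msg)
    then issues ++ ["Assertion failures - check test expectations"] else issues
  let issues := if error_messages.any (fun msg => PySem.Str.isIn "ImportError" msg)
    then issues ++ ["Import errors - check dependencies"] else issues
  let issues := if error_messages.any (fun msg => PySem.Str.isIn "timeout" (PySem.Str.lower msg))
    then issues ++ ["Timeout issues - tests running too long"] else issues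
  issues

-- ===== PORT B =====
-- B: one pass over failed_tests maintaining three boolean flags, then emit the messages.
def analyze_common_issues_py_alt (failed_tests : List (List (String × String))) : List String :=
  let flags := failed_tests.foldl
    (fun (f : Bool × Bool × Bool) test =>
      (f.1 || PySem.Str.isIn "AssertionError" (PySem.Dict.getD ⟨test⟩ "error" ""),
       f.2.1 || PySem.Str.isIn "ImportError" (PySem.Dict.getD ⟨test⟩ "error" ""),
       f.2.2 || PySem.Str.isIn "timeout" (PySem.Str.lower (PySem.Dict.getD ⟨test⟩ "error" ""))))
    (false, false, false)
  (if flags.1 then ["Assertion failures - check test expectations"] else []) ++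
  (if flags.2.1 then ["Import errors - check dependencies"] else []) ++
  (if flags.2.2 then ["Timeout issues - tests running too long"] else [])

-- ===== PRECONDITION & SPEC =====
def Spec_analyze_common_issues_py (failed_tests : List (List (String × String))) (out : List String) : Prop := out = analyze_common_issues_py_alt failed_tests
instance (failed_tests : List (List (String × String))) (out : List String) : Decidable (Spec_analyze_common_issues_py failed_tests out) := by unfold Spec_analyze_common_issues_py; infer_instance

-- ===== CLAIM (what is proved, stated in full; the proofs are below) =====
def Claim_equal_analyze_common_issues_py : Prop := ∀ (failed_tests : List (List (String × String))), Dom_analyze_common_issues_py failed_tests → Spec_analyze_common_issues_py failed_tests (analyze_common_issues_py failed_tests)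

-- ===== LEMMAS AND PROOFS =====
theorem flags_fold_eq (l : List (List (String × String))) (a b c : Bool) :
    l.foldl
      (fun (f : Bool × Bool × Bool) test =>
        (f.1 || PySem.Str.isIn "AssertionError" (PySem.Dict.getD ⟨test⟩ "error" ""),
         f.2.1 || PySem.Str.isIn "ImportError" (PySem.Dict.getD ⟨test⟩ "error" ""),
         f.2.2 || PySem.Str.isIn "timeout" (PySem.Str.lower (PySem.Dict.getD ⟨test⟩ "error" ""))))
      (a, b, c)
    = (a || l.any (fun t => PySem.Str.isIn "AssertionError" (PySem.Dict.getD (⟨t⟩ : PySem.Dict String String) "error" "")),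
       b || l.any (fun t => PySem.Str.isIn "ImportError" (PySem.Dict.getD (⟨t⟩ : PySem.Dict String String) "error" "")),
       c || l.any (fun t => PySem.Str.isIn "timeout" (PySem.Str.lower (PySem.Dict.getD (⟨t⟩ : PySem.Dict String String) "error" "")))) := by
  induction l generalizing a b c with
  | nil => simp
  | cons h t ih => rw [List.foldl_cons, ih]; simp [Bool.or_assoc]

-- ===== VERDICT (by name: the statement is the Claim_ definition above) =====
theorem analyze_common_issues_py_spec : Claim_equal_analyze_common_issues_py := by
  intro failed_tests _
  unfold Spec_analyze_common_issues_py analyze_common_issues_py analyze_common_issues_py_alt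
  rw [flags_fold_eq]
  simp only [List.any_map, Bool.false_or, Function.comp_def]
  cases h1 : failed_tests.any (fun t => PySem.Str.isIn "AssertionError" (PySem.Dict.getD (⟨t⟩ : PySem.Dict String String) "error" "")) <;>
  cases h2 : failed_tests.any (fun t => PySem.Str.isIn "ImportError" (PySem.Dict.getD (⟨t⟩ : PySem.Dict String String) "error" "")) <;>
  cases h3 : failed_tests.any (fun t => PySem.Str.isIn "timeout" (PySem.Str.lower (PySem.Dict.getD (⟨t⟩ : PySem.Dict String String) "error" ""))) <;>
    first | simp [h1, h2, h3] | simp
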